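-- pv_equiv track=rewrite | github.com/fumaghe/Bet_Website | SCRAPER/download_old.py | remove_country_code
-- ===== SOURCE A (Python) =====
-- COUNTRY_CODES = {
--     "it","ch","eng","fr","de","nl","pt","es","ua","rs",
--     "cz","sk","hr","sct","be","at"
-- }
--
-- def remove_country_code(team_name: str) -> str:
--     name = (team_name or "").strip()
--     if not name:
--         return name
--     for code in COUNTRY_CODES:
--         if name.startswith(code):
--             name = name[len(code):].strip()
--             break
--     for code in COUNTRY_CODES:
--         if name.endswith(code):
--             name = name[:-len(code)].strip()
--             break
--     return name
-- ===== SOURCE B (Python) =====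
-- COUNTRY_CODES = {
--     "it","ch","eng","fr","de","nl","pt","es","ua","rs",
--     "cz","sk","hr","sct","be","at"
-- }
--
-- def remove_country_code(team_name: str) -> str:
--     # Look up the name's own 3- and 2-char edges in the code set instead of
--     # scanning the code set; valid because no code is a prefix/suffix of another.
--     name = (team_name or "").strip()
--     if not name:
--         return name
--     for L in (3, 2):
--         if name[:L] in COUNTRY_CODES:
--             name = name[L:].strip()
--             break
--     for L in (3, 2):
--         if name[-L:] in COUNTRY_CODES:
--             name = name[:-L].strip()
--             break
--     return name
-- ===== Notes on version B (the rewrite author's own statement) =====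
-- stated objective: alternative
-- what changed: Instead of scanning the COUNTRY_CODES set testing startswith/endswith for each code, B derives the name's own 3- and 2-character front/back slices and looks them up in the code set, which is correct because no code is a prefix or suffix of another.
import Mathlib
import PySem

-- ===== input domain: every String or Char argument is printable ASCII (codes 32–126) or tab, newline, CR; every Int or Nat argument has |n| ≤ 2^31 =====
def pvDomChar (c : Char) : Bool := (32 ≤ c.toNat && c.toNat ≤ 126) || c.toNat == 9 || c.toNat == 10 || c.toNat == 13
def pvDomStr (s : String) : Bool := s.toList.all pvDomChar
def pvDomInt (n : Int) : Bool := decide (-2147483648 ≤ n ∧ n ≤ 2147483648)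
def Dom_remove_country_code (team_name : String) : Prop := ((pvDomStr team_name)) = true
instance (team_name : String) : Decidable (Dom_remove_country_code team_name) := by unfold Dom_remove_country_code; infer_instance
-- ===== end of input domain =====

-- B replaces A's scan over the country-code set by looking up the name's own
-- 3- and 2-character edges in the code set (valid since no code is a prefix or
-- suffix of another); alternative decomposition, same cost.


-- ===== PORT A =====
-- COUNTRY_CODES in CPython's set-iteration order (the order is immaterial:
-- no code is a prefix or suffix of another, so at most one code can match).
def pvCodes : List (List Char) :=
  [['f','r'], ['n','l'], ['u','a'], ['d','e'], ['s','k'], ['r','s'], ['i','t'], ['p','t'],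
   ['s','c','t'], ['e','s'], ['a','t'], ['c','h'], ['e','n','g'], ['h','r'], ['b','e'], ['c','z']]

-- A's first loop: first code with name.startswith(code) → name[len(code):].strip(), break.
def pvPrefLoop : List (List Char) → List Char → List Char
  | [], name => name
  | c :: cs, name =>
    if PySem.Chars.startswith name c then PySem.Chars.strip (name.drop c.length)
    else pvPrefLoop cs name

-- A's second loop: first code with name.endswith(code) → name[:-len(code)].strip(), break.
-- name[:-k] (k ≥ 1) is exactly take (len - k), including k > len (→ []).
def pvSufLoop : List (List Char) → List Char → List Char
  | [], name => name
  | c :: cs, name =>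
    if PySem.Chars.endswith name c then PySem.Chars.strip (name.take (name.length - c.length))
    else pvSufLoop cs name

def remove_country_code (team_name : String) : String :=
  let name := PySem.Chars.strip team_name.toList
  if name = [] then String.ofList name
  else String.ofList (pvSufLoop pvCodes (pvPrefLoop pvCodes name))

-- ===== PORT B =====
-- Source B's first loop, unrolled over L ∈ (3, 2): name[:L] in COUNTRY_CODES → name[L:].strip().
def pvCutPref (name : List Char) : List Char :=
  if name.take 3 ∈ pvCodes then PySem.Chars.strip (name.drop 3)
  else if name.take 2 ∈ pvCodes then PySem.Chars.strip (name.drop 2)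
  else name

-- Source B's second loop: name[-L:] in COUNTRY_CODES → name[:-L].strip();
-- name[-L:] is drop (len - L) (the whole list when len < L), name[:-L] is take (len - L).
def pvCutSuf (name : List Char) : List Char :=
  if name.drop (name.length - 3) ∈ pvCodes then PySem.Chars.strip (name.take (name.length - 3))
  else if name.drop (name.length - 2) ∈ pvCodes then PySem.Chars.strip (name.take (name.length - 2))
  else name

def remove_country_code_alt (team_name : String) : String :=
  let name := PySem.Chars.strip team_name.toList
  if name = [] then String.ofList name
  else String.ofList (pvCutSuf (pvCutPref name))

-- ===== PRECONDITION & SPEC =====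
def Spec_remove_country_code (team_name : String) (out : String) : Prop := out = remove_country_code_alt team_name
instance (team_name : String) (out : String) : Decidable (Spec_remove_country_code team_name out) := by unfold Spec_remove_country_code; infer_instance

-- ===== CLAIM (what is proved, stated in full; the proofs are below) =====
def Claim_equal_remove_country_code : Prop := ∀ (team_name : String), Dom_remove_country_code team_name → Spec_remove_country_code team_name (remove_country_code team_name)

-- ===== LEMMAS AND PROOFS =====

-- Every code has length 2 or 3.
theorem pvCodes_len : ∀ c ∈ pvCodes, c.length = 2 ∨ c.length = 3 := by decide

-- No code is a proper prefix of another (prefix-free up to equality).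
theorem pvCodes_prefix_free : ∀ c ∈ pvCodes, ∀ d ∈ pvCodes, c <+: d → c = d := by decide

-- No code is a proper suffix of another.
theorem pvCodes_suffix_free : ∀ c ∈ pvCodes, ∀ d ∈ pvCodes, c <:+ d → c = d := by decide

-- A's loop when no code matches.
theorem prefLoop_none (cs : List (List Char)) (l : List Char)
    (h : ∀ c ∈ cs, ¬ (PySem.Chars.startswith l c = true)) : pvPrefLoop cs l = l := by
  induction cs with
  | nil => rfl
  | cons c cs ih =>
    rw [pvPrefLoop, if_neg (h c (List.mem_cons_self))]
    exact ih fun d hd => h d (List.mem_cons_of_mem c hd)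

-- A's loop when a unique code matches: any iteration order yields that code.
theorem prefLoop_mem (cs : List (List Char)) (l : List Char) (c0 : List Char)
    (h0 : c0 ∈ cs) (hm : PySem.Chars.startswith l c0 = true)
    (uniq : ∀ c ∈ cs, PySem.Chars.startswith l c = true → c = c0) :
    pvPrefLoop cs l = PySem.Chars.strip (l.drop c0.length) := by
  induction cs with
  | nil => cases h0
  | cons c cs ih =>
    rw [pvPrefLoop]
    by_cases hc : PySem.Chars.startswith l c = true
    · rw [if_pos hc, uniq c List.mem_cons_self hc]
    · rw [if_neg hc]
      rcases List.mem_cons.mp h0 with rfl | h0'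
      · exact absurd hm hc
      · exact ih h0' fun d hd => uniq d (List.mem_cons_of_mem c hd)

theorem sufLoop_none (cs : List (List Char)) (l : List Char)
    (h : ∀ c ∈ cs, ¬ (PySem.Chars.endswith l c = true)) : pvSufLoop cs l = l := by
  induction cs with
  | nil => rfl
  | cons c cs ih =>
    rw [pvSufLoop, if_neg (h c (List.mem_cons_self))]
    exact ih fun d hd => h d (List.mem_cons_of_mem c hd)

theorem sufLoop_mem (cs : List (List Char)) (l : List Char) (c0 : List Char)
    (h0 : c0 ∈ cs) (hm : PySem.Chars.endswith l c0 = true)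
    (uniq : ∀ c ∈ cs, PySem.Chars.endswith l c = true → c = c0) :
    pvSufLoop cs l = PySem.Chars.strip (l.take (l.length - c0.length)) := by
  induction cs with
  | nil => cases h0
  | cons c cs ih =>
    rw [pvSufLoop]
    by_cases hc : PySem.Chars.endswith l c = true
    · rw [if_pos hc, uniq c List.mem_cons_self hc]
    · rw [if_neg hc]
      rcases List.mem_cons.mp h0 with rfl | h0'
      · exact absurd hm hc
      · exact ih h0' fun d hd => uniq d (List.mem_cons_of_mem c hd)

-- a matching code is exactly l.take of its own length
theorem pref_code_take (l c : List Char) (hc : c ∈ pvCodes) (h : c <+: l) :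
    (c.length = 2 ∧ c = l.take 2) ∨ (c.length = 3 ∧ c = l.take 3) := by
  rcases pvCodes_len c hc with h2 | h3
  · exact Or.inl ⟨h2, by rw [← h2]; exact List.prefix_iff_eq_take.mp h⟩
  · exact Or.inr ⟨h3, by rw [← h3]; exact List.prefix_iff_eq_take.mp h⟩

theorem suf_code_drop (l c : List Char) (hc : c ∈ pvCodes) (h : c <:+ l) :
    (c.length = 2 ∧ c = l.drop (l.length - 2)) ∨ (c.length = 3 ∧ c = l.drop (l.length - 3)) := by
  rcases pvCodes_len c hc with h2 | h3
  · exact Or.inl ⟨h2, by rw [← h2]; exact List.suffix_iff_eq_drop.mp h⟩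
  · exact Or.inr ⟨h3, by rw [← h3]; exact List.suffix_iff_eq_drop.mp h⟩

-- uniqueness of a matching code among prefixes / suffixes
theorem pref_uniq (l c d : List Char) (hc : c ∈ pvCodes) (hd : d ∈ pvCodes)
    (h1 : c <+: l) (h2 : d <+: l) : c = d := by
  rcases List.prefix_or_prefix_of_prefix h1 h2 with h | h
  · exact pvCodes_prefix_free c hc d hd h
  · exact (pvCodes_prefix_free d hd c hc h).symm

theorem suf_uniq (l c d : List Char) (hc : c ∈ pvCodes) (hd : d ∈ pvCodes)
    (h1 : c <:+ l) (h2 : d <:+ l) : c = d := by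
  rcases List.suffix_or_suffix_of_suffix h1 h2 with h | h
  · exact pvCodes_suffix_free c hc d hd h
  · exact (pvCodes_suffix_free d hd c hc h).symm

theorem pref_eq (l : List Char) : pvPrefLoop pvCodes l = pvCutPref l := by
  by_cases m3 : l.take 3 ∈ pvCodes
  · -- the 3-char (or whole, if l is short) front is a code
    have hpre : l.take 3 <+: l := List.take_prefix 3 l
    have huniq : ∀ c ∈ pvCodes, PySem.Chars.startswith l c = true → c = l.take 3 := by
      intro c hc hm
      exact pref_uniq l c (l.take 3) hc m3 ((PySem.Chars.startswith_iff l c).mp hm) hpre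
    rw [prefLoop_mem pvCodes l (l.take 3) m3 ((PySem.Chars.startswith_iff l (l.take 3)).mpr hpre) huniq]
    rw [pvCutPref, if_pos m3]
    -- drop (take 3).length = drop 3 even when l is shorter than 3
    rcases pvCodes_len (l.take 3) m3 with h2 | h3
    · -- then l itself has length 2, and both drops are []
      have hlt : (l.take 3).length = min 3 l.length := List.length_take
      have e1 : l.drop (l.take 3).length = [] := List.drop_eq_nil_of_le (by omega)
      have e2 : l.drop 3 = ([] : List Char) := List.drop_eq_nil_of_le (by omega)
      rw [e1, e2]
    · rw [h3]
  · rw [pvCutPref, if_neg m3]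
    by_cases m2 : l.take 2 ∈ pvCodes
    · have hpre : l.take 2 <+: l := List.take_prefix 2 l
      have huniq : ∀ c ∈ pvCodes, PySem.Chars.startswith l c = true → c = l.take 2 := by
        intro c hc hm
        exact pref_uniq l c (l.take 2) hc m2 ((PySem.Chars.startswith_iff l c).mp hm) hpre
      rw [prefLoop_mem pvCodes l (l.take 2) m2 ((PySem.Chars.startswith_iff l (l.take 2)).mpr hpre) huniq]
      rw [if_pos m2]
      -- take 2 must have length exactly 2 here (length ≤ 1 front is never a code)
      rcases pvCodes_len (l.take 2) m2 with h2 | h3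
      · rw [h2]
      · have hlt : (l.take 2).length = min 2 l.length := List.length_take
        omega
    · rw [if_neg m2]
      apply prefLoop_none
      intro c hc hm
      rcases pref_code_take l c hc ((PySem.Chars.startswith_iff l c).mp hm) with ⟨_, he⟩ | ⟨_, he⟩
      · exact m2 (he ▸ hc)
      · exact m3 (he ▸ hc)

theorem suf_eq (l : List Char) : pvSufLoop pvCodes l = pvCutSuf l := by
  by_cases m3 : l.drop (l.length - 3) ∈ pvCodes
  · have hsuf : l.drop (l.length - 3) <:+ l := List.drop_suffix _ l
    have huniq : ∀ c ∈ pvCodes, PySem.Chars.endswith l c = true → c = l.drop (l.length - 3) := by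
      intro c hc hm
      exact suf_uniq l c _ hc m3 ((PySem.Chars.endswith_iff l c).mp hm) hsuf
    rw [sufLoop_mem pvCodes l _ m3 ((PySem.Chars.endswith_iff l _).mpr hsuf) huniq]
    rw [pvCutSuf, if_pos m3]
    rcases pvCodes_len _ m3 with h2 | h3
    · -- then l itself has length 2 and both takes are []
      have hld : (l.drop (l.length - 3)).length = l.length - (l.length - 3) := List.length_drop
      have harith : l.length - (l.drop (l.length - 3)).length = l.length - 3 := by omega
      rw [harith]
    · rw [h3]
  · rw [pvCutSuf, if_neg m3]
    by_cases m2 : l.drop (l.length - 2) ∈ pvCodes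
    · have hsuf : l.drop (l.length - 2) <:+ l := List.drop_suffix _ l
      have huniq : ∀ c ∈ pvCodes, PySem.Chars.endswith l c = true → c = l.drop (l.length - 2) := by
        intro c hc hm
        exact suf_uniq l c _ hc m2 ((PySem.Chars.endswith_iff l c).mp hm) hsuf
      rw [sufLoop_mem pvCodes l _ m2 ((PySem.Chars.endswith_iff l _).mpr hsuf) huniq]
      rw [if_pos m2]
      rcases pvCodes_len _ m2 with h2 | h3
      · rw [h2]
      · have hld : (l.drop (l.length - 2)).length = l.length - (l.length - 2) := List.length_drop
        omega
    · rw [if_neg m2]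
      apply sufLoop_none
      intro c hc hm
      rcases suf_code_drop l c hc ((PySem.Chars.endswith_iff l c).mp hm) with ⟨_, he⟩ | ⟨_, he⟩
      · exact m2 (he ▸ hc)
      · exact m3 (he ▸ hc)

-- ===== VERDICT (by name: the statement is the Claim_ definition above) =====
theorem remove_country_code_spec : Claim_equal_remove_country_code := by
  intro s _
  unfold Spec_remove_country_code remove_country_code remove_country_code_alt
  simp only [pref_eq, suf_eq]
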